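-- pv_equiv track=rewrite | github.com/LDziat/LexiClash | game/views.py | prescore
-- ===== SOURCE A (Python) =====
-- def score_word(word):
--     point_map = {
--         'A': 1, 'B': 3, 'C': 3, 'D': 2, 'E': 1, 'F': 4, 'G': 2, 'H': 4,
--         'I': 1, 'J': 8, 'K': 5, 'L': 1, 'M': 3, 'N': 1, 'O': 1, 'P': 3,
--         'Q': 10, 'R': 1, 'S': 1, 'T': 1, 'U': 1, 'V': 4, 'W': 4, 'X': 8,
--         'Y': 4, 'Z': 10, '$': 0,
--     }
--     return sum(point_map.get(char, 0) for char in word.upper())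
--
-- def prescore(dic_h_v):
--     if not dic_h_v:
--         return 0
--
--     retscore = sum(
--         score_word(word)
--         for key in ['horizontal', 'vertical', 'bonus']
--         for word in (dic_h_v.get(key) or [])
--     )
--     return retscore
-- ===== SOURCE B (Python) =====
-- def prescore(dic_h_v):
--     point_map = {
--         'A': 1, 'B': 3, 'C': 3, 'D': 2, 'E': 1, 'F': 4, 'G': 2, 'H': 4,
--         'I': 1, 'J': 8, 'K': 5, 'L': 1, 'M': 3, 'N': 1, 'O': 1, 'P': 3,
--         'Q': 10, 'R': 1, 'S': 1, 'T': 1, 'U': 1, 'V': 4, 'W': 4, 'X': 8,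
--         'Y': 4, 'Z': 10, '$': 0,
--     }
--     counts = {}
--     for key in ('horizontal', 'vertical', 'bonus'):
--         for word in dic_h_v.get(key) or []:
--             for ch in word.upper():
--                 counts[ch] = counts.get(ch, 0) + 1
--     return sum(point_map.get(ch, 0) * n for ch, n in counts.items())
-- ===== Notes on version B (the rewrite author's own statement) =====
-- stated objective: alternative
-- what changed: B replaces per-word scoring (sum of score_word over every word) by building one letter-frequency dict over all upper-cased characters of the three lists and then computing a single weighted sum point*count over distinct letters.
import Mathlib
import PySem

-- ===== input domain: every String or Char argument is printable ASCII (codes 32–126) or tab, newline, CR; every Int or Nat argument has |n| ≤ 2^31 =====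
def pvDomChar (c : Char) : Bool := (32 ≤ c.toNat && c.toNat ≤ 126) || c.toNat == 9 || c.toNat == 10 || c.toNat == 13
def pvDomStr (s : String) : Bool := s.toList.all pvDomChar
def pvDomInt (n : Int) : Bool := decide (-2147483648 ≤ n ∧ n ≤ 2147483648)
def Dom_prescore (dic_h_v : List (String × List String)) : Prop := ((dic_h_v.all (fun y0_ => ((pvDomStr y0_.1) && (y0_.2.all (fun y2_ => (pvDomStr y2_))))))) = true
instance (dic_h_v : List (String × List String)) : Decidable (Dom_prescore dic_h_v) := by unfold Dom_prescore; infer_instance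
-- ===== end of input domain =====

-- B replaces per-word scoring by one letter-frequency table (dict counter over all
-- upper-cased characters) followed by a single weighting pass over distinct letters
-- (objective: alternative data structure; same exact total).

-- ===== PORT A =====
def pvPointPairs : List (Char × Int) :=
  [('A', 1), ('B', 3), ('C', 3), ('D', 2), ('E', 1), ('F', 4), ('G', 2), ('H', 4),
   ('I', 1), ('J', 8), ('K', 5), ('L', 1), ('M', 3), ('N', 1), ('O', 1), ('P', 3),
   ('Q', 10), ('R', 1), ('S', 1), ('T', 1), ('U', 1), ('V', 4), ('W', 4), ('X', 8),
   ('Y', 4), ('Z', 10), ('$', 0)]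

def pvPointMapA : PySem.Dict Char Int := PySem.Dict.ofList pvPointPairs

-- sum(point_map.get(char, 0) for char in word.upper())
def scoreWordA (word : String) : Int :=
  ((PySem.Str.upper word).toList.map (fun c => pvPointMapA.getD c 0)).sum

-- dic_h_v.get(key) or []  (first-match association-list lookup; None or [] → [])
def pvGetA (d : List (String × List String)) (key : String) : List String :=
  match d.find? (fun p => p.1 == key) with
  | none => []
  | some p => p.2

def prescore (dic_h_v : List (String × List String)) : Int :=
  if dic_h_v = [] then 0
  else
    ((["horizontal", "vertical", "bonus"].flatMap (fun key => pvGetA dic_h_v key)).map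
      scoreWordA).sum

-- ===== PORT B =====
def pvPointMapB : PySem.Dict Char Int := PySem.Dict.ofList pvPointPairs

def pvGetB (d : List (String × List String)) (key : String) : List String :=
  match d.find? (fun p => p.1 == key) with
  | none => []
  | some p => p.2

-- counts[ch] = counts.get(ch, 0) + 1, over all upper-cased characters of the three lists
def pvCountsB (dic_h_v : List (String × List String)) : PySem.Dict Char Int :=
  ((["horizontal", "vertical", "bonus"].flatMap (fun key => pvGetB dic_h_v key)).flatMap
      (fun w => (PySem.Str.upper w).toList)).foldl
    (fun d c => d.insert c (d.getD c 0 + 1)) PySem.Dict.empty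

def prescore_alt (dic_h_v : List (String × List String)) : Int :=
  ((pvCountsB dic_h_v).items.map (fun p => pvPointMapB.getD p.1 0 * p.2)).sum

-- ===== PRECONDITION & SPEC =====
def Spec_prescore (dic_h_v : List (String × List String)) (out : Int) : Prop := out = prescore_alt dic_h_v
instance (dic_h_v : List (String × List String)) (out : Int) : Decidable (Spec_prescore dic_h_v out) := by unfold Spec_prescore; infer_instance

-- ===== CLAIM (what is proved, stated in full; the proofs are below) =====
def Claim_equal_prescore : Prop := ∀ (dic_h_v : List (String × List String)), Dom_prescore dic_h_v → Spec_prescore dic_h_v (prescore dic_h_v)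

-- ===== LEMMAS AND PROOFS =====

-- picking one element out of a duplicate-free list
theorem sum_map_ite_self (f : Char → Int) (s : List Char) (a : Char)
    (hnd : s.Nodup) (ha : a ∈ s) :
    (s.map (fun c => if c = a then f c else 0)).sum = f a := by
  induction s with
  | nil => cases ha
  | cons x xs ih =>
    rw [List.map_cons, List.sum_cons]
    have hnd' := List.nodup_cons.mp hnd
    by_cases hxa : x = a
    · rw [if_pos hxa]
      have hz : (xs.map (fun c => if c = a then f c else 0)).sum = 0 := by
        apply List.sum_eq_zero
        intro y hy
        rcases List.mem_map.mp hy with ⟨c, hc, rfl⟩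
        have hca : c ≠ a := fun e => hnd'.1 (hxa ▸ e ▸ hc)
        simp [hca]
      rw [hz, hxa]; ring
    · rw [if_neg hxa]
      have ha' : a ∈ xs := by
        rcases List.mem_cons.mp ha with h | h
        · exact absurd h.symm hxa
        · exact h
      rw [ih hnd'.2 ha']; ring

-- weighted sum over distinct elements = plain sum over the list
theorem sum_weighted (f : Char → Int) (l : List Char) (s : List Char)
    (hnd : s.Nodup) (hmem : ∀ x ∈ l, x ∈ s) :
    (s.map (fun c => f c * (l.count c : Int))).sum = (l.map f).sum := by
  induction l with
  | nil => simp
  | cons a l ih =>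
    have hsum :
        (s.map (fun c => f c * ((a :: l).count c : Int))).sum
          = (s.map (fun c => f c * (l.count c : Int))).sum
            + (s.map (fun c => if c = a then f c else 0)).sum := by
      rw [← List.sum_map_add]
      apply congrArg
      apply List.map_congr_left
      intro c _
      by_cases hca : c = a
      · subst hca
        simp [List.count_cons_self]
        ring
      · have hc2 : (a :: l).count c = l.count c := by
          simp [Ne.symm hca]
        simp [hc2, hca]
    rw [hsum, ih (fun x hx => hmem x (List.mem_cons_of_mem a hx)),
      sum_map_ite_self f s a hnd (hmem a List.mem_cons_self)]
    simp [add_comm]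

-- sum of per-word sums = sum over the flattened character list
theorem sum_map_flatMap (f : Char → Int) (g : String → List Char) (ws : List String) :
    ((ws.flatMap g).map f).sum = (ws.map (fun w => ((g w).map f).sum)).sum := by
  induction ws with
  | nil => simp
  | cons w ws ih => simp [List.flatMap_cons, ih]

-- ===== VERDICT (by name: the statement is the Claim_ definition above) =====
theorem prescore_spec : Claim_equal_prescore := by
  intro d _
  unfold Spec_prescore prescore prescore_alt pvCountsB
  set ws : List String := ["horizontal", "vertical", "bonus"].flatMap (fun key => pvGetB d key) with hws
  set chars : List Char := ws.flatMap (fun w => (PySem.Str.upper w).toList) with hchars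
  have hget : pvGetA = pvGetB := rfl
  rw [PySem.Dict.foldl_insert_getD_add_one_eq_counter, PySem.Dict.items_counter]
  rw [List.map_map]
  have hrhs :
      ((PySem.Set.ofList chars).map
          ((fun p : Char × Int => pvPointMapB.getD p.1 0 * p.2) ∘ fun k => (k, (chars.count k : Int)))).sum
        = (chars.map (fun c => pvPointMapB.getD c 0)).sum := by
    exact sum_weighted (fun c => pvPointMapB.getD c 0) chars (PySem.Set.ofList chars)
      (PySem.Set.nodup_ofList chars) (fun x hx => (PySem.Set.mem_ofList chars x).mpr hx)
  rw [hrhs, sum_map_flatMap (fun c => pvPointMapB.getD c 0) (fun w => (PySem.Str.upper w).toList) ws]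
  by_cases hd : d = []
  · subst hd
    simp [hws, pvGetB]
  · rw [if_neg hd, hget]
    rfl
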